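-- pv_equiv track=rewrite | github.com/RougeVader/CDPC-1 | python9.py | nextLargest
-- ===== SOURCE A (Python) =====
-- def nextLargest(arr):
--     n = len(arr)
--     result = []
--     for i in range(n):
--         if i+2 < n:
--             result.append(arr[i+2])
--         else:
--             result.append(-1)
--     return result
-- ===== SOURCE B (Python) =====
-- def nextLargest(arr):
--     return list(arr[2:]) + [-1] * min(2, len(arr))
-- ===== Notes on version B (the rewrite author's own statement) =====
-- stated objective: simpler
-- what changed: Replaces the index loop with per-element bounds test by a single tail slice arr[2:] concatenated with min(2, len(arr)) sentinel -1s.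
import Mathlib
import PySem

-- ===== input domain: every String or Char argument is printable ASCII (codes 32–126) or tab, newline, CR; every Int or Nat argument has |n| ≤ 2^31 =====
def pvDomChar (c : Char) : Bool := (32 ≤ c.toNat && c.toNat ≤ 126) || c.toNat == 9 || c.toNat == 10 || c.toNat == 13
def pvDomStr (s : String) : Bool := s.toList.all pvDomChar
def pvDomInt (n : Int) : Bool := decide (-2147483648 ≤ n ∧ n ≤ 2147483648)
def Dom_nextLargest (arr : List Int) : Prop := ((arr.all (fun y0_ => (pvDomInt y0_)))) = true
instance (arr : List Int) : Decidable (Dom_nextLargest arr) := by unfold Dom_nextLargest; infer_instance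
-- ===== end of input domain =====

-- B replaces A's index loop with a tail slice plus sentinel padding (objective: simpler).

-- ===== PORT A =====
def nextLargest (arr : List Int) : List Int :=
  let n : Int := arr.length
  (PySem.List.pyRange 0 n 1).foldl
    (fun result i =>
      if i + 2 < n then result ++ [PySem.List.pyGetD arr (i + 2) 0]
      else result ++ [-1]) []

-- ===== PORT B =====
def nextLargest_alt (arr : List Int) : List Int :=
  PySem.List.slice arr (some 2) none ++ List.replicate (min 2 arr.length) (-1)

-- ===== PRECONDITION & SPEC =====
def Spec_nextLargest (arr : List Int) (out : List Int) : Prop := out = nextLargest_alt arr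
instance (arr : List Int) (out : List Int) : Decidable (Spec_nextLargest arr out) := by unfold Spec_nextLargest; infer_instance

-- ===== CLAIM (what is proved, stated in full; the proofs are below) =====
def Claim_equal_nextLargest : Prop := ∀ (arr : List Int), Dom_nextLargest arr → Spec_nextLargest arr (nextLargest arr)

-- ===== LEMMAS AND PROOFS =====

theorem nextLargest_eq_map (arr : List Int) :
    nextLargest arr =
      (PySem.List.pyRange 0 (arr.length : Int) 1).map
        (fun i => if i + 2 < (arr.length : Int) then PySem.List.pyGetD arr (i + 2) 0 else -1) := by
  unfold nextLargest
  have h : (fun (result : List Int) (i : Int) =>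
      if i + 2 < (arr.length : Int) then result ++ [PySem.List.pyGetD arr (i + 2) 0]
      else result ++ [-1]) =
      (fun (result : List Int) (i : Int) =>
        result ++ [if i + 2 < (arr.length : Int) then PySem.List.pyGetD arr (i + 2) 0 else -1]) := by
    funext result i; split <;> rfl
  simp only [h]
  exact (PySem.List.foldl_append_singleton_eq_map _ _ _).trans (by simp)

theorem nextLargest_spec' (arr : List Int) : nextLargest arr = nextLargest_alt arr := by
  rw [nextLargest_eq_map]
  unfold nextLargest_alt
  rw [show PySem.List.slice arr (some 2) none = arr.drop 2 from by
    rw [show ((2 : Int)) = ((2 : Nat) : Int) by norm_num, PySem.List.slice_from_natCast]]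
  apply List.ext_getElem
  · simp [PySem.List.length_pyRange_one]; omega
  · intro k h1 h2
    rw [List.getElem_map, PySem.List.getElem_pyRange_one]
    by_cases hk : k + 2 < arr.length
    · have hlt : ((0 : Int) + k) + 2 < (arr.length : Int) := by push_cast; omega
      rw [if_pos hlt]
      have : ((0 : Int) + k) + 2 = ((k + 2 : Nat) : Int) := by push_cast; ring
      rw [this, PySem.List.pyGetD_natCast]
      have hkd : k < (arr.drop 2).length := by simp; omega
      rw [List.getElem_append_left hkd, List.getElem_drop,
        List.getD_eq_getElem?_getD, List.getElem?_eq_getElem hk, Option.getD_some]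
      congr 1
      omega
    · have hge : ¬ ((0 : Int) + k) + 2 < (arr.length : Int) := by push_cast; omega
      rw [if_neg hge]
      have hkd : (arr.drop 2).length ≤ k := by simp; omega
      rw [List.getElem_append_right hkd]
      simp

-- ===== VERDICT (by name: the statement is the Claim_ definition above) =====
theorem nextLargest_spec : Claim_equal_nextLargest := by
  intro arr _
  exact nextLargest_spec' arr
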